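-- pv_equiv track=rewrite | github.com/pypi-data/pypi-mirror-386 | packages/noveler/noveler-3.0.0.tar.gz/noveler-3.0.0/scripts/tools/fix_pytest_warnings.py | find_fixture_with_marks
-- ===== SOURCE A (Python) =====
-- from typing import List, Tuple
--
-- def find_fixture_with_marks(content: str) -> List[Tuple[int, str]]:
--     """fixtureにマークが適用されている箇所を検出"""
--     problems = []
--     lines = content.split('\n')
--
--     for i in range(len(lines) - 1):
--         current = lines[i].strip()
--         next_line = lines[i + 1].strip() if i + 1 < len(lines) else ""
--
--         # Pattern 1: @pytest.fixture followed by @pytest.mark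
--         if current == "@pytest.fixture" and next_line.startswith("@pytest.mark."):
--             problems.append((i, "fixture_then_mark"))
--
--         # Pattern 2: @pytest.mark followed by @pytest.fixture
--         if current.startswith("@pytest.mark.") and next_line == "@pytest.fixture":
--             # Check if more marks follow
--             j = i - 1
--             while j >= 0 and lines[j].strip().startswith("@pytest.mark."):
--                 j -= 1
--             problems.append((j + 1, "marks_then_fixture"))
--
--     return problems
-- ===== SOURCE B (Python) =====
-- def find_fixture_with_marks(content):
--     """Strip all lines once, then walk adjacent pairs keeping run_start =
--     start index of the current run of @pytest.mark. lines (no backward scan)."""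
--     lines = [l.strip() for l in content.split('\n')]
--     problems = []
--     run_start = 0
--     for i, (cur, nxt) in enumerate(zip(lines, lines[1:])):
--         if cur.startswith("@pytest.mark."):
--             if nxt == "@pytest.fixture":
--                 problems.append((run_start, "marks_then_fixture"))
--         else:
--             run_start = i + 1
--             if cur == "@pytest.fixture" and nxt.startswith("@pytest.mark."):
--                 problems.append((i, "fixture_then_mark"))
--     return problems
-- ===== Notes on version B (the rewrite author's own statement) =====
-- stated objective: simpler
-- what changed: B strips all lines once up front and does a single structural walk over adjacent line pairs, maintaining run_start (the first index of the current consecutive block of @pytest.mark. lines) instead of A's inner backward while-loop that re-scans preceding mark lines on every pattern-2 hit.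
import Mathlib
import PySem

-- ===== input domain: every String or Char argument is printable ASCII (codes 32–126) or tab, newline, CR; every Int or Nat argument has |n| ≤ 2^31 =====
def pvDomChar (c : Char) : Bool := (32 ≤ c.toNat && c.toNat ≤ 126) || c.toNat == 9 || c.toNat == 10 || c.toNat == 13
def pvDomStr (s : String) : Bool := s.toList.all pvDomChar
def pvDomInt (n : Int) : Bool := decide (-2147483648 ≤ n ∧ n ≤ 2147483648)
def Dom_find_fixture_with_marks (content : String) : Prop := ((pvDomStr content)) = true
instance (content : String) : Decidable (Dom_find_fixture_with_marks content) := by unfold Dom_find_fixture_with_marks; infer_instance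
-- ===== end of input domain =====

-- B strips all lines once and walks adjacent pairs structurally, keeping run_start =
-- the start index of the current run of "@pytest.mark." lines instead of A's backward
-- inner while-loop (objective: simpler).

-- ===== PORT A =====
-- `lines[i].strip().startswith("@pytest.mark.")` / `lines[i].strip() == "@pytest.fixture"`
def pvIsMark (lines : List String) (i : Nat) : Bool :=
  PySem.Str.startswith (PySem.Str.strip (lines.getD i "")) "@pytest.mark."
def pvIsFix (lines : List String) (i : Nat) : Bool :=
  PySem.Str.strip (lines.getD i "") == "@pytest.fixture"

-- A's inner backward while-loop: `j := i-1; while j ≥ 0 and mark(lines[j]): j -= 1`,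
-- the argument is A's j+1; returns the final j+1.
def pvBackA (lines : List String) : Nat → Nat
  | 0 => 0
  | k+1 => if pvIsMark lines k then pvBackA lines k else k+1

def pvStepA (lines : List String) (problems : List (Int × String)) (i : Nat) : List (Int × String) :=
  let problems :=
    if pvIsFix lines i && pvIsMark lines (i+1) then
      problems ++ [((i : Int), "fixture_then_mark")]
    else problems
  if pvIsMark lines i && pvIsFix lines (i+1) then
    problems ++ [(((pvBackA lines i) : Int), "marks_then_fixture")]
  else problems

def find_fixture_with_marks (content : String) : List (Int × String) :=
  let lines := (PySem.Str.split? content "\n").getD []   -- sep "\n" ≠ "", so split? is always `some`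
  (List.range (lines.length - 1)).foldl (pvStepA lines) []

-- ===== PORT B =====
-- the loop `for i, (cur, nxt) in enumerate(zip(lines, lines[1:]))` as structural
-- recursion on the stripped-line list; emits this step's problems in front.
def pvWalkB : List String → Nat → Nat → List (Int × String)
  | cur :: nxt :: rest, i, run_start =>
    if PySem.Str.startswith cur "@pytest.mark." then
      (if nxt == "@pytest.fixture" then [((run_start : Int), "marks_then_fixture")] else [])
        ++ pvWalkB (nxt :: rest) (i + 1) run_start
    else
      (if cur == "@pytest.fixture" && PySem.Str.startswith nxt "@pytest.mark." then
        [((i : Int), "fixture_then_mark")] else [])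
        ++ pvWalkB (nxt :: rest) (i + 1) (i + 1)
  | _, _, _ => []

def find_fixture_with_marks_alt (content : String) : List (Int × String) :=
  pvWalkB (((PySem.Str.split? content "\n").getD []).map PySem.Str.strip) 0 0

-- ===== PRECONDITION & SPEC =====
def Spec_find_fixture_with_marks (content : String) (out : List (Int × String)) : Prop := out = find_fixture_with_marks_alt content
instance (content : String) (out : List (Int × String)) : Decidable (Spec_find_fixture_with_marks content out) := by unfold Spec_find_fixture_with_marks; infer_instance

-- ===== CLAIM (what is proved, stated in full; the proofs are below) =====
def Claim_equal_find_fixture_with_marks : Prop := ∀ (content : String), Dom_find_fixture_with_marks content → Spec_find_fixture_with_marks content (find_fixture_with_marks content)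

-- ===== LEMMAS AND PROOFS =====

-- the problems A's iteration i contributes
def pvItems (lines : List String) (i : Nat) : List (Int × String) :=
  (if pvIsFix lines i && pvIsMark lines (i+1) then [((i : Int), "fixture_then_mark")] else [])
    ++ (if pvIsMark lines i && pvIsFix lines (i+1) then [(((pvBackA lines i) : Int), "marks_then_fixture")] else [])

lemma pvStepA_eq (lines : List String) (acc : List (Int × String)) (i : Nat) :
    pvStepA lines acc i = acc ++ pvItems lines i := by
  unfold pvStepA pvItems
  split_ifs <;> simp

lemma foldA_eq (lines : List String) (n : Nat) :
    (List.range n).foldl (pvStepA lines) [] = (List.range n).flatMap (pvItems lines) := by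
  induction n with
  | zero => rfl
  | succ n ih =>
    simp [List.range_succ, pvStepA_eq, ih]

lemma getD_map_strip (lines : List String) (i : Nat) :
    (lines.map PySem.Str.strip).getD i "" = PySem.Str.strip (lines.getD i "") := by
  simp only [List.getD, List.getElem?_map]
  cases lines[i]? with
  | none => decide
  | some x => rfl

lemma walk_spec (lines : List String) (suf : List String) : ∀ (i rs : Nat),
    suf = (lines.map PySem.Str.strip).drop i →
    (pvIsMark lines i = true → rs = pvBackA lines i) →
    pvWalkB suf i rs = (List.range' i (lines.length - 1 - i)).flatMap (pvItems lines) := by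
  induction suf with
  | nil =>
    intro i rs hsuf _
    have hlen : lines.length ≤ i := by
      have := congrArg List.length hsuf
      simp at this; omega
    have : lines.length - 1 - i = 0 := by omega
    simp [this, pvWalkB]
  | cons cur tl ih =>
    intro i rs hsuf hrs
    cases tl with
    | nil =>
      have hlen : lines.length - i = 1 := by
        have := congrArg List.length hsuf
        simp at this; omega
      have : lines.length - 1 - i = 0 := by omega
      simp [this, pvWalkB]
    | cons nxt rest =>
      have hlen : lines.length - i = rest.length + 2 := by
        have := congrArg List.length hsuf
        simp at this; omega
      have hcur : cur = PySem.Str.strip (lines.getD i "") := by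
        have h0 : (lines.map PySem.Str.strip)[i]? = some cur := by
          have := congrArg (fun l => l[0]?) hsuf
          simpa [List.getElem?_drop] using this.symm
        rw [← getD_map_strip]
        simp [List.getD, h0]
      have hnxt : nxt = PySem.Str.strip (lines.getD (i+1) "") := by
        have h1 : (lines.map PySem.Str.strip)[i+1]? = some nxt := by
          have := congrArg (fun l => l[1]?) hsuf
          simpa [List.getElem?_drop] using this.symm
        rw [← getD_map_strip]
        simp [List.getD, h1]
      have htl : (nxt :: rest : List String) = (lines.map PySem.Str.strip).drop (i+1) := by
        have := congrArg List.tail hsuf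
        simpa [List.tail_drop] using this
      have hrange : lines.length - 1 - i = (lines.length - 1 - (i+1)) + 1 := by omega
      rw [hrange, List.range'_succ, List.flatMap_cons]
      by_cases hm : pvIsMark lines i = true
      · -- mark branch
        have hb := hrs hm
        have hm' : PySem.Str.startswith (PySem.Str.strip (lines.getD i "")) "@pytest.mark." = true := hm
        have hmc : PySem.Str.startswith cur "@pytest.mark." = true := by rw [hcur]; exact hm'
        have hfixI : pvIsFix lines i = false := by
          unfold pvIsFix
          cases h : (PySem.Str.strip (lines.getD i "") == "@pytest.fixture") with
          | false => rfl
          | true => exact absurd (beq_iff_eq.mp h ▸ hm') (by decide)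
        have hnf : (nxt == "@pytest.fixture") = pvIsFix lines (i+1) := by rw [hnxt]; rfl
        have ihrec := ih (i+1) rs htl (fun _ => by
          rw [hb, show pvBackA lines (i+1) = if pvIsMark lines i then pvBackA lines i else i+1 from rfl,
            if_pos hm])
        simp only [pvWalkB]
        rw [if_pos hmc, ihrec, hnf, hb]
        unfold pvItems
        rw [hfixI, hm]
        simp
      · -- non-mark branch
        simp only [Bool.not_eq_true] at hm
        have hmc : PySem.Str.startswith cur "@pytest.mark." = false := by rw [hcur]; exact hm
        have hcf : (cur == "@pytest.fixture") = pvIsFix lines i := by rw [hcur]; rfl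
        have hnm : PySem.Str.startswith nxt "@pytest.mark." = pvIsMark lines (i+1) := by rw [hnxt]; rfl
        have ihrec := ih (i+1) (i+1) htl (fun _ => by
          rw [show pvBackA lines (i+1) = if pvIsMark lines i then pvBackA lines i else i+1 from rfl,
            if_neg (by simp [hm])])
        simp only [pvWalkB]
        rw [if_neg (show ¬ (PySem.Str.startswith cur "@pytest.mark." = true) by rw [hmc]; decide),
          ihrec, hcf, hnm]
        unfold pvItems
        rw [hm]
        simp

-- ===== VERDICT (by name: the statement is the Claim_ definition above) =====
theorem find_fixture_with_marks_spec : Claim_equal_find_fixture_with_marks := by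
  intro content _
  show find_fixture_with_marks content = find_fixture_with_marks_alt content
  unfold find_fixture_with_marks find_fixture_with_marks_alt
  set lines := (PySem.Str.split? content "\n").getD [] with hl
  rw [foldA_eq, walk_spec lines (lines.map PySem.Str.strip) 0 0 List.drop_zero.symm
    (fun _ => rfl)]
  simp [List.range_eq_range']
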